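-- pv_equiv track=rewrite | github.com/euijinbang/Algorithmn | algorithm-python/220201_이전/naver_financial_211031/1.py | solution
-- ===== SOURCE A (Python) =====
-- def solution(id_list, k):
--     my_dict = {}
--     for day in id_list:
--         ids = sorted(day.split())
--         for id in ids:
--             my_dict[id] = 0
--
--     for day in id_list:
--         ids = sorted(set(day.split()))
--         for id in ids:
--             if my_dict[id] >= k:
--                 continue
--             my_dict[id] += 1
--
--     answer = sum(my_dict.values())
--     return answer
-- ===== SOURCE B (Python) =====
-- def solution(id_list, k):
--     toks = sorted(t for day in id_list for t in set(day.split()))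
--     if not toks:
--         return 0
--     total = 0
--     prev = toks[0]
--     run = 1
--     for t in toks[1:]:
--         if t == prev:
--             run += 1
--         else:
--             total += max(0, min(run, k))
--             prev = t
--             run = 1
--     return total + max(0, min(run, k))
-- ===== Notes on version B (the rewrite author's own statement) =====
-- stated objective: alternative
-- what changed: B replaces A's dict with no index at all: it flattens each day's distinct tokens into one list, sorts it globally, and computes the answer in a single run-length scan over the sorted list, clamping each run length to [0,k]; A's pre-registration pass, per-day sorts and in-loop cap disappear.
import Mathlib
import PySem

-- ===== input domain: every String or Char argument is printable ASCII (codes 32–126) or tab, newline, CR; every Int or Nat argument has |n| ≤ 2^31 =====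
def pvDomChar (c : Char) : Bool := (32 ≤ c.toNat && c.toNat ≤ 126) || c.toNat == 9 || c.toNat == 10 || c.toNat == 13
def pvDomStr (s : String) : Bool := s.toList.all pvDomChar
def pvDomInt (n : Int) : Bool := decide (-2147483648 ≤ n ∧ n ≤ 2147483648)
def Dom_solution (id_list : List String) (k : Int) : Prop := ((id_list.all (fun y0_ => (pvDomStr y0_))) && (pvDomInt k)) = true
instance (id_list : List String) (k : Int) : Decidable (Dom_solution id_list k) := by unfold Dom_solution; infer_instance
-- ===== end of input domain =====

-- B replaces A's dict entirely: it flattens each day's distinct tokens, sorts the one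
-- flat list, and sums the runs of the sorted list with each run length clamped to [0,k]
-- (alternative algorithm; same return value).

-- ===== PORT A =====
-- my_dict[id] in the second Python loop is read with getD _ 0: every id there was
-- registered by the first loop, so the Python lookup never raises and getD is exact.
def solution (id_list : List String) (k : Int) : Int :=
  let d0 : PySem.Dict String Int :=
    id_list.foldl (fun d day =>
      (PySem.List.sorted (PySem.Str.split₀ day) (fun x => x)).foldl
        (fun d id => d.insert id 0) d) PySem.Dict.empty
  let d1 : PySem.Dict String Int :=
    id_list.foldl (fun d day =>
      (PySem.List.sorted (PySem.Set.ofList (PySem.Str.split₀ day)) (fun x => x)).foldl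
        (fun d id => if d.getD id 0 ≥ k then d else d.modify id 0 (· + 1)) d) d0
  d1.values.foldl (· + ·) 0

-- ===== PORT B =====
-- run-length scan of the sorted token list: total/prev/run are the Python loop state
def pvScan (k total : Int) (prev : String) (run : Int) : List String → Int
  | [] => total + max 0 (min run k)
  | t :: ts =>
    if t = prev then pvScan k total prev (run + 1) ts
    else pvScan k (total + max 0 (min run k)) t 1 ts

def solution_alt (id_list : List String) (k : Int) : Int :=
  let toks := PySem.List.sorted
    (id_list.flatMap (fun day => PySem.Set.ofList (PySem.Str.split₀ day))) (fun x => x)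
  match toks with
  | [] => 0
  | x :: xs => pvScan k 0 x 1 xs

-- ===== PRECONDITION & SPEC =====
def Spec_solution (id_list : List String) (k : Int) (out : Int) : Prop := out = solution_alt id_list k
instance (id_list : List String) (k : Int) (out : Int) : Decidable (Spec_solution id_list k out) := by unfold Spec_solution; infer_instance

-- ===== CLAIM (what is proved, stated in full; the proofs are below) =====
def Claim_equal_solution : Prop := ∀ (id_list : List String) (k : Int), Dom_solution id_list k → Spec_solution id_list k (solution id_list k)

-- ===== LEMMAS AND PROOFS =====

-- fold of a flatMap is the nested fold
theorem pv_foldl_flatMap {α β γ : Type} (l : List α) (g : α → List β) (f : γ → β → γ) (init : γ) :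
    (l.flatMap g).foldl f init = l.foldl (fun acc x => (g x).foldl f acc) init := by
  induction l generalizing init with
  | nil => rfl
  | cons x xs ih => simp [List.flatMap_cons, List.foldl_append, ih]

-- per-id step function of A's second loop, iterated
def pvF (k v : Int) : Int := if v ≥ k then v else v + 1

def pvIter (k : Int) : Nat → Int → Int
  | 0, v => v
  | m + 1, v => pvIter k m (pvF k v)

theorem pvIter_min (k : Int) (_hk : 0 ≤ k) (m : Nat) (v : Int) (hv : 0 ≤ v) (hvk : v ≤ k) :
    pvIter k m v = min (v + m) k := by
  induction m generalizing v with
  | zero => simp [pvIter]; omega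
  | succ n ih =>
    by_cases h : v ≥ k
    · have : pvF k v = v := by simp [pvF, h]
      rw [pvIter, this, ih v hv hvk]; omega
    · have : pvF k v = v + 1 := by simp [pvF, h]
      rw [pvIter, this, ih (v + 1) (by omega) (by omega)]
      push_cast; omega

theorem pvIter_neg (k : Int) (hk : k < 0) (m : Nat) : pvIter k m 0 = 0 := by
  induction m with
  | zero => rfl
  | succ n ih => have : pvF k 0 = 0 := by simp [pvF]; omega
                 rw [pvIter, this, ih]

theorem pvIter_clamp (k : Int) (m : Nat) : pvIter k m 0 = max 0 (min (m : Int) k) := by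
  by_cases hk : 0 ≤ k
  · rw [pvIter_min k hk m 0 le_rfl hk]; omega
  · rw [pvIter_neg k (by omega) m]; omega

-- A's second loop, per id: the stored value is pvF iterated count-many times
theorem pv_getD_step (k : Int) (l : List String) (d : PySem.Dict String Int) (id : String) :
    (l.foldl (fun d x => if d.getD x 0 ≥ k then d else d.modify x 0 (· + 1)) d).getD id 0
      = pvIter k (l.count id) (d.getD id 0) := by
  induction l generalizing d with
  | nil => rfl
  | cons x xs ih =>
    rw [List.foldl_cons, ih]
    by_cases hx : x = id
    · subst hx
      by_cases h : d.getD x 0 ≥ k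
      · simp only [if_pos h, List.count_cons_self, pvIter]
        have : pvF k (d.getD x 0) = d.getD x 0 := by simp [pvF, h]
        rw [this]
      · simp only [if_neg h, List.count_cons_self, pvIter]
        have h1 : (d.modify x 0 (· + 1)).getD x 0 = d.getD x 0 + 1 := by
          rw [PySem.Dict.getD_modify]; simp
        have h2 : pvF k (d.getD x 0) = d.getD x 0 + 1 := by simp [pvF, h]
        rw [h1, h2]
    · have hcnt : (x :: xs).count id = xs.count id := by
        simp [hx]
      rw [hcnt]
      by_cases h : d.getD x 0 ≥ k
      · simp only [if_pos h]
      · simp only [if_neg h]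
        congr 1
        rw [PySem.Dict.getD_modify]
        simp [Ne.symm hx]

-- A's second loop never adds a key when every processed id is already present
theorem pv_keys_step (k : Int) (l : List String) (d : PySem.Dict String Int)
    (h : ∀ x ∈ l, x ∈ d.keys) :
    (l.foldl (fun d x => if d.getD x 0 ≥ k then d else d.modify x 0 (· + 1)) d).keys = d.keys := by
  induction l generalizing d with
  | nil => rfl
  | cons x xs ih =>
    have hx : x ∈ d.keys := h x (List.mem_cons_self)
    have hkeys : ∀ (f : Int → Int), (d.modify x 0 f).keys = d.keys := by
      intro f
      rw [PySem.Dict.keys_modify, PySem.Dict.keys_insert_of_contains]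
      rw [PySem.Dict.contains_iff_mem_keys]; exact hx
    rw [List.foldl_cons]
    by_cases hc : d.getD x 0 ≥ k
    · simp only [if_pos hc]
      exact ih d (fun y hy => h y (List.mem_cons_of_mem _ hy))
    · simp only [if_neg hc]
      rw [ih _ (fun y hy => by rw [hkeys]; exact h y (List.mem_cons_of_mem _ hy)), hkeys]

-- the registration loop stores 0 at every key
theorem pv_getD_insert_zero (l : List String) (d : PySem.Dict String Int)
    (h : ∀ id, d.getD id 0 = 0) (id : String) :
    (l.foldl (fun d x => d.insert x (0 : Int)) d).getD id 0 = 0 := by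
  induction l generalizing d with
  | nil => exact h id
  | cons x xs ih =>
    rw [List.foldl_cons]
    refine ih _ (fun j => ?_)
    by_cases hj : j = x
    · subst hj; rw [PySem.Dict.getD_insert_self]
    · rw [PySem.Dict.getD_insert_of_ne _ _ _ hj]; exact h j

-- two sums over nodup index lists with the same members and agreeing summands are equal
theorem pv_sum_map_congr_perm {α : Type} [DecidableEq α] (s t : List α) (f g : α → Int)
    (hs : s.Nodup) (ht : t.Nodup) (hmem : ∀ x, x ∈ s ↔ x ∈ t) (hfg : ∀ x ∈ s, f x = g x) :
    (s.map f).sum = (t.map g).sum := by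
  have hperm : s.Perm t := (List.perm_ext_iff_of_nodup hs ht).2 hmem
  rw [List.map_congr_left hfg]
  exact (hperm.map g).sum_eq

-- B's scan on a ≤-sorted remainder: total so far + clamp of the finished current run
-- + clamped counts of the ids strictly after prev
theorem pv_scan_eq (k : Int) (s : List String) : ∀ (total run : Int) (prev : String),
    (prev :: s).Pairwise (· ≤ ·) →
    pvScan k total prev run s
      = total + max 0 (min (run + (s.count prev : Int)) k)
        + ((PySem.Set.discard (PySem.Set.ofList s) prev).map
            (fun x => max 0 (min (s.count x : Int) k))).sum := by
  induction s with
  | nil => intro total run prev _; simp [pvScan, PySem.Set.ofList]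
  | cons y ys ih =>
    intro total run prev hpair
    have hpy : prev ≤ y := (List.pairwise_cons.1 hpair).1 y List.mem_cons_self
    have htail : (y :: ys).Pairwise (· ≤ ·) := (List.pairwise_cons.1 hpair).2
    by_cases hyp : y = prev
    · subst hyp
      rw [pvScan, if_pos rfl]
      have hp : (y :: ys).Pairwise (· ≤ ·) := htail
      rw [ih total (run + 1) y hp]
      have hcnt : ((y :: ys).count y : Int) = (ys.count y : Int) + 1 := by
        rw [List.count_cons_self]; push_cast; ring
      have hset : ((PySem.Set.discard (PySem.Set.ofList ys) y).map
            (fun x => max 0 (min (ys.count x : Int) k))).sum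
          = ((PySem.Set.discard (PySem.Set.ofList (y :: ys)) y).map
            (fun x => max 0 (min (((y :: ys).count x : Nat) : Int) k))).sum := by
        apply pv_sum_map_congr_perm
        · exact PySem.Set.nodup_discard _ _ (PySem.Set.nodup_ofList ys)
        · exact PySem.Set.nodup_discard _ _ (PySem.Set.nodup_ofList (y :: ys))
        · intro x
          simp [PySem.Set.mem_discard, PySem.Set.mem_ofList, List.mem_cons]
          tauto
        · intro x hx
          have hxy : x ≠ y := ((PySem.Set.mem_discard (PySem.Set.ofList ys) y x).1 hx).2
          simp [Ne.symm hxy]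
      rw [hset, hcnt]
      ring_nf
    · have hlt : prev < y := lt_of_le_of_ne hpy (fun h => hyp h.symm)
      have hys_gt : ∀ z ∈ ys, y ≤ z := (List.pairwise_cons.1 htail).1
      have hne_prev : ∀ z ∈ y :: ys, z ≠ prev := by
        intro z hz
        rcases List.mem_cons.1 hz with h | h
        · subst h; exact hyp ∘ (fun h => h)
        · exact fun he => absurd (he ▸ hys_gt z h) (not_le.2 hlt)
      rw [pvScan, if_neg hyp]
      rw [ih (total + max 0 (min run k)) 1 y htail]
      have hcnt_prev : (y :: ys).count prev = 0 := by
        rw [List.count_eq_zero]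
        intro h; exact hne_prev prev h rfl
      -- RHS: sum over discard (ofList (y::ys)) prev = clamp(count y) + sum over discard (ofList ys) y
      have hofc : PySem.Set.ofList (y :: ys) = y :: PySem.Set.discard (PySem.Set.ofList ys) y :=
        PySem.Set.ofList_cons y ys
      have hdisc : PySem.Set.discard (PySem.Set.ofList (y :: ys)) prev
          = y :: PySem.Set.discard (PySem.Set.discard (PySem.Set.ofList ys) y) prev := by
        rw [hofc]
        show List.filter _ _ = _
        rw [List.filter_cons]
        simp [hyp]
        rfl
      have hdisc2 : PySem.Set.discard (PySem.Set.discard (PySem.Set.ofList ys) y) prev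
          = PySem.Set.discard (PySem.Set.ofList ys) y := by
        apply List.filter_eq_self.2
        intro z hz
        have hzmem : z ∈ ys :=
          (PySem.Set.mem_ofList _ _).1 ((PySem.Set.mem_discard _ _ _).1 hz).1
        have := hne_prev z (List.mem_cons_of_mem _ hzmem)
        simpa using this
      have hsum2 : ((PySem.Set.discard (PySem.Set.ofList ys) y).map
            (fun x => max 0 (min (ys.count x : Int) k))).sum
          = ((PySem.Set.discard (PySem.Set.ofList ys) y).map
            (fun x => max 0 (min (((y :: ys).count x : Nat) : Int) k))).sum := by
        apply congrArg
        apply List.map_congr_left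
        intro x hx
        have hxy : x ≠ y := ((PySem.Set.mem_discard _ _ _).1 hx).2
        simp [Ne.symm hxy]
      have hcy : ((y :: ys).count y : Int) = (ys.count y : Int) + 1 := by
        rw [List.count_cons_self]; push_cast; ring
      rw [hdisc, hdisc2, List.map_cons, List.sum_cons, hcnt_prev, hcy, ← hsum2]
      push_cast
      ring_nf

-- ===== VERDICT (by name: the statement is the Claim_ definition above) =====
theorem solution_spec : Claim_equal_solution := by
  intro id_list k _
  unfold Spec_solution solution solution_alt
  simp only []
  -- the flattened token lists
  set T : List String := id_list.flatMap (fun day => PySem.List.sorted (PySem.Str.split₀ day) (fun x => x)) with hT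
  set L : List String := id_list.flatMap (fun day => PySem.Set.ofList (PySem.Str.split₀ day)) with hL
  set LA : List String := id_list.flatMap (fun day => PySem.List.sorted (PySem.Set.ofList (PySem.Str.split₀ day)) (fun x => x)) with hLA
  have memT : ∀ x, x ∈ T ↔ ∃ day ∈ id_list, x ∈ PySem.Str.split₀ day := by
    intro x; rw [hT]; simp [List.mem_flatMap, PySem.List.mem_sorted]
  have memLA : ∀ x, x ∈ LA ↔ ∃ day ∈ id_list, x ∈ PySem.Str.split₀ day := by
    intro x; rw [hLA]; simp [List.mem_flatMap, PySem.List.mem_sorted, PySem.Set.mem_ofList]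
  have memL : ∀ x, x ∈ L ↔ ∃ day ∈ id_list, x ∈ PySem.Str.split₀ day := by
    intro x; rw [hL]; simp [List.mem_flatMap, PySem.Set.mem_ofList]
  have hperm : LA.Perm L := by
    rw [hLA, hL]
    refine List.Perm.flatMap_left id_list ?_
    intro day _
    exact PySem.List.sorted_perm _ _ _
  -- ===== A side: value = Σ over distinct T of clamp(count in L) =====
  have hA0 : (id_list.foldl (fun d day =>
        (PySem.List.sorted (PySem.Str.split₀ day) (fun x => x)).foldl
          (fun d id => d.insert id (0 : Int)) d) PySem.Dict.empty)
      = T.foldl (fun d id => d.insert id (0 : Int)) PySem.Dict.empty := by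
    rw [hT, ← pv_foldl_flatMap]
  rw [hA0]
  set d0 : PySem.Dict String Int := T.foldl (fun d id => d.insert id (0 : Int)) PySem.Dict.empty with hd0
  have hkeys0 : d0.keys = PySem.Set.ofList T := by
    rw [hd0, PySem.Dict.keys_foldl_insert T (fun _ _ => (0 : Int)), PySem.Dict.keys_empty,
        PySem.Set.update_nil_left]
  have hval0 : ∀ id, d0.getD id 0 = 0 := by
    intro id
    rw [hd0]
    exact pv_getD_insert_zero T PySem.Dict.empty (fun j => by simp [PySem.Dict.getD_empty]) id
  have hA1 : (id_list.foldl (fun d day =>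
        (PySem.List.sorted (PySem.Set.ofList (PySem.Str.split₀ day)) (fun x => x)).foldl
          (fun d id => if d.getD id 0 ≥ k then d else d.modify id 0 (· + 1)) d) d0)
      = LA.foldl (fun d id => if d.getD id 0 ≥ k then d else d.modify id 0 (· + 1)) d0 := by
    rw [hLA, ← pv_foldl_flatMap]
  rw [hA1]
  set d1 := LA.foldl (fun d id => if d.getD id 0 ≥ k then d else d.modify id 0 (· + 1)) d0 with hd1
  have hkeys1 : d1.keys = PySem.Set.ofList T := by
    rw [hd1, pv_keys_step k LA d0 (fun x hx => by
      rw [hkeys0, PySem.Set.mem_ofList, memT]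
      exact (memLA x).mp hx), hkeys0]
  have hval1 : ∀ id, d1.getD id 0 = max 0 (min (L.count id : Int) k) := by
    intro id
    rw [hd1, pv_getD_step, hval0, pvIter_clamp, hperm.count_eq]
  have hAval : d1.values = (PySem.Set.ofList T).map (fun id => max 0 (min (L.count id : Int) k)) := by
    rw [PySem.Dict.values_eq_map_keys d1 (by rw [hkeys1]; exact PySem.Set.nodup_ofList T) 0, hkeys1]
    exact List.map_congr_left (fun id _ => hval1 id)
  rw [hAval, PySem.List.foldl_add (g := fun x => x)]
  simp only [List.map_id', zero_add]
  -- ===== B side =====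
  rcases htoks : PySem.List.sorted L (fun x => x) false with _ | ⟨x, xs⟩
  · -- empty token list: both sides are 0
    have hLnil : L = [] := (PySem.List.sorted_eq_nil_iff _ _ _).1 htoks
    have hTnil : PySem.Set.ofList T = [] := by
      rw [List.eq_nil_iff_forall_not_mem]
      intro v hv
      have := (memT v).1 ((PySem.Set.mem_ofList _ _).1 hv)
      have hvL : v ∈ L := (memL v).2 this
      rw [hLnil] at hvL; exact absurd hvL (List.not_mem_nil)
    rw [hTnil]; rfl
  · -- nonempty: run-length scan
    have hpair : (x :: xs).Pairwise (· ≤ ·) := by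
      have := PySem.List.sorted_pairwise (xs := L) (key := fun x => x)
      rw [htoks] at this; exact this
    change _ = pvScan k 0 x 1 xs
    rw [pv_scan_eq k xs 0 1 x hpair]
    have htperm : (x :: xs).Perm L := htoks ▸ PySem.List.sorted_perm _ _ _
    have hcount : ∀ v, (L.count v : Int) = ((x :: xs).count v : Int) := by
      intro v; rw [htperm.count_eq]
    -- Σ over distinct T = Σ over distinct (x::xs)
    have hbig : ((PySem.Set.ofList T).map (fun id => max 0 (min (L.count id : Int) k))).sum
        = ((PySem.Set.ofList (x :: xs)).map
            (fun id => max 0 (min (((x :: xs).count id : Nat) : Int) k))).sum := by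
      apply pv_sum_map_congr_perm
      · exact PySem.Set.nodup_ofList T
      · exact PySem.Set.nodup_ofList (x :: xs)
      · intro v
        rw [PySem.Set.mem_ofList, PySem.Set.mem_ofList, memT, ← memL, ← htperm.mem_iff]
      · intro v _; rw [hcount v]
    have hofc : PySem.Set.ofList (x :: xs) = x :: PySem.Set.discard (PySem.Set.ofList xs) x :=
      PySem.Set.ofList_cons x xs
    have hcx : ((x :: xs).count x : Int) = (xs.count x : Int) + 1 := by
      rw [List.count_cons_self]; push_cast; ring
    have htailsum : ((PySem.Set.discard (PySem.Set.ofList xs) x).map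
          (fun id => max 0 (min (((x :: xs).count id : Nat) : Int) k))).sum
        = ((PySem.Set.discard (PySem.Set.ofList xs) x).map
          (fun id => max 0 (min ((xs.count id : Nat) : Int) k))).sum := by
      apply congrArg
      apply List.map_congr_left
      intro v hv
      have hvx : v ≠ x := ((PySem.Set.mem_discard _ _ _).1 hv).2
      simp [Ne.symm hvx]
    rw [hbig, hofc, List.map_cons, List.sum_cons, htailsum, hcx]
    ring_nf
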